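-- pv_equiv track=rewrite | github.com/trungnt13/odin-ai | odin/backend/tensor.py | _input_connection_shape
-- ===== SOURCE A (Python) =====
-- def _input_connection_shape(input_dim, hidden_dim, num_layers,
--                             bidirectional, skip_input):
--   shapes = []
--   for i, l in enumerate(range(num_layers)):
--     if i == 0: # first layers
--       s = (hidden_dim, input_dim) if not skip_input else (0, 0)
--     else: # other layers
--       s = (hidden_dim, hidden_dim * 2) if bidirectional else (hidden_dim, hidden_dim)
--     if bidirectional:
--       shapes.append(s)
--     shapes.append(s)
--   return shapes
-- ===== SOURCE B (Python) =====
-- def _input_connection_shape(input_dim, hidden_dim, num_layers,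
--                             bidirectional, skip_input):
--   # Build the list BACK TO FRONT: precompute the two possible shapes, walk the
--   # layers from the last down to the first appending each layer's block, then
--   # reverse once at the end.
--   first = (0, 0) if skip_input else (hidden_dim, input_dim)
--   other = (hidden_dim, hidden_dim * 2) if bidirectional else (hidden_dim, hidden_dim)
--   rev = []
--   layer = num_layers
--   while layer >= 1:
--     s = first if layer == 1 else other
--     rev.append(s)
--     if bidirectional:
--       rev.append(s)
--     layer -= 1
--   rev.reverse()
--   return rev
-- ===== Notes on version B (the rewrite author's own statement) =====
-- stated objective: alternative
-- what changed: Replaced A's forward enumerate-loop (index test and conditional double-append at the tail) by a backward while-loop that precomputes the two possible shapes once, walks the layers from the last down to the first appending each layer's block, and reverses the list once at the end.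
import Mathlib
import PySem

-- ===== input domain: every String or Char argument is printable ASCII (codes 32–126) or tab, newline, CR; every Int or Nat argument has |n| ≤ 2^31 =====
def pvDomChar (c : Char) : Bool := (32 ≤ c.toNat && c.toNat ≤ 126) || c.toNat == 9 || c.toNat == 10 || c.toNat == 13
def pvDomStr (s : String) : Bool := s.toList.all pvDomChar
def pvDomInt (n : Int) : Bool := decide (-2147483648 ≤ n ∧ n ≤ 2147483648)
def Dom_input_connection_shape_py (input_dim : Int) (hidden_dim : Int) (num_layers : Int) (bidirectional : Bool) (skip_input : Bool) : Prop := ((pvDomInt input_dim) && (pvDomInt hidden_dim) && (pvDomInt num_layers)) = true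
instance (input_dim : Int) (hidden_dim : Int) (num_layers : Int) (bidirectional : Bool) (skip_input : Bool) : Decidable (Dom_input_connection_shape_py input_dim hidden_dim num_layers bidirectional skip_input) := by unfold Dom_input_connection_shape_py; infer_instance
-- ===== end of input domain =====

-- B replaces A's forward enumerate-loop by a backward loop that builds the list back to front from two precomputed shapes (objective: alternative decomposition).

-- ===== PORT A =====
def input_connection_shape_py (input_dim : Int) (hidden_dim : Int) (num_layers : Int) (bidirectional : Bool) (skip_input : Bool) : List (Int × Int) :=
  (PySem.List.enumerate (PySem.List.pyRange 0 num_layers 1) 0).foldl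
    (fun shapes il =>
      let s : Int × Int :=
        if il.1 = 0 then
          (if !skip_input then (hidden_dim, input_dim) else (0, 0))
        else
          (if bidirectional then (hidden_dim, hidden_dim * 2) else (hidden_dim, hidden_dim))
      let shapes := if bidirectional then shapes ++ [s] else shapes
      shapes ++ [s]) []

-- ===== PORT B =====
-- while layer >= 1: append the layer's block, decrement; reversed at the end (back-to-front construction)
def icspLoop (first other : Int × Int) (bidirectional : Bool) (layer : Int) (rev : List (Int × Int)) : List (Int × Int) :=
  if 1 ≤ layer then
    let s : Int × Int := if layer = 1 then first else other
    icspLoop first other bidirectional (layer - 1) (rev ++ (if bidirectional then [s, s] else [s]))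
  else rev
termination_by layer.toNat
decreasing_by omega

def input_connection_shape_py_alt (input_dim : Int) (hidden_dim : Int) (num_layers : Int) (bidirectional : Bool) (skip_input : Bool) : List (Int × Int) :=
  let first : Int × Int := if skip_input then (0, 0) else (hidden_dim, input_dim)
  let other : Int × Int := if bidirectional then (hidden_dim, hidden_dim * 2) else (hidden_dim, hidden_dim)
  (icspLoop first other bidirectional num_layers []).reverse

-- ===== PRECONDITION & SPEC =====
def Spec_input_connection_shape_py (input_dim : Int) (hidden_dim : Int) (num_layers : Int) (bidirectional : Bool) (skip_input : Bool) (out : List (Int × Int)) : Prop := out = input_connection_shape_py_alt input_dim hidden_dim num_layers bidirectional skip_input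
instance (input_dim : Int) (hidden_dim : Int) (num_layers : Int) (bidirectional : Bool) (skip_input : Bool) (out : List (Int × Int)) : Decidable (Spec_input_connection_shape_py input_dim hidden_dim num_layers bidirectional skip_input out) := by unfold Spec_input_connection_shape_py; infer_instance

-- ===== CLAIM (what is proved, stated in full; the proofs are below) =====
def Claim_equal_input_connection_shape_py : Prop := ∀ (input_dim : Int) (hidden_dim : Int) (num_layers : Int) (bidirectional : Bool) (skip_input : Bool), Dom_input_connection_shape_py input_dim hidden_dim num_layers bidirectional skip_input → Spec_input_connection_shape_py input_dim hidden_dim num_layers bidirectional skip_input (input_connection_shape_py input_dim hidden_dim num_layers bidirectional skip_input)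

-- ===== LEMMAS AND PROOFS =====

-- the loop body appends one block per iteration: fold = init ++ flatMap of blocks
theorem icsp_foldl_append {α β : Type} (g : β → List α) :
    ∀ (l : List β) (init : List α),
      l.foldl (fun acc x => acc ++ g x) init = init ++ l.flatMap g := by
  intro l
  induction l with
  | nil => intro init; simp
  | cons x xs ih => intro init; simp [List.foldl, ih]

-- every index in the tail of the enumeration is nonzero, so each block is the "other" block
theorem icsp_tail (g : Int × Int → List (Int × Int)) (r : Nat) (v : Int × Int)
    (hg : ∀ p : Int × Int, p.1 ≠ 0 → g p = List.replicate r v) :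
    ∀ (xs : List Int) (s : Int), 1 ≤ s →
      (PySem.List.enumerate xs s).flatMap g = List.replicate (xs.length * r) v := by
  intro xs
  induction xs with
  | nil => intro s hs; simp [PySem.List.enumerate_nil]
  | cons x xs ih =>
    intro s hs
    rw [PySem.List.enumerate_cons, List.flatMap_cons, ih (s + 1) (by omega),
        hg (s, x) (by simp; omega), List.replicate_append_replicate]
    congr 1
    simp [Nat.succ_mul]; omega

-- closed-form characterisation of B's backward loop (invariant: result = accumulator ++ appended blocks)
theorem icsp_loop_closed (first other : Int × Int) (b : Bool) :
    ∀ (k : Nat) (layer : Int) (rev : List (Int × Int)), layer.toNat = k →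
      icspLoop first other b layer rev =
        rev ++ (if 1 ≤ layer then
          List.replicate ((if b then 2 else 1) * (layer - 1).toNat) other ++
          List.replicate (if b then 2 else 1) first
        else []) := by
  intro k
  induction k with
  | zero =>
    intro layer rev hk
    rw [icspLoop, if_neg (by omega), if_neg (by omega), List.append_nil]
  | succ m ih =>
    intro layer rev hk
    have hlay : (1:Int) ≤ layer := by omega
    rw [icspLoop, if_pos hlay, ih (layer - 1) _ (by omega), if_pos hlay, List.append_assoc]
    by_cases h1 : layer = 1
    · subst h1
      cases b <;> simp
    · rw [if_pos (by omega : (1:Int) ≤ layer - 1), if_neg h1]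
      have h2 : (if b then 2 else 1) * (layer - 1).toNat
          = (if b then 2 else 1) + (if b then 2 else 1) * (layer - 1 - 1).toNat := by
        cases b <;> simp <;> omega
      rw [h2, ← List.replicate_append_replicate]
      cases b <;> simp

-- closed-form characterisation of A's forward fold
theorem icsp_A_closed (input_dim hidden_dim num_layers : Int) (bidirectional skip_input : Bool)
    (hn : 1 ≤ num_layers) :
    input_connection_shape_py input_dim hidden_dim num_layers bidirectional skip_input =
      List.replicate (if bidirectional then 2 else 1)
        (if skip_input then ((0:Int), (0:Int)) else (hidden_dim, input_dim)) ++
      List.replicate ((if bidirectional then 2 else 1) * (num_layers - 1).toNat)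
        (if bidirectional then (hidden_dim, hidden_dim * 2) else (hidden_dim, hidden_dim)) := by
  unfold input_connection_shape_py
  rw [PySem.List.pyRange_one_cons (by omega), PySem.List.enumerate_cons]
  set first : Int × Int := if skip_input then ((0:Int), (0:Int)) else (hidden_dim, input_dim) with hfirst
  set other : Int × Int := if bidirectional then (hidden_dim, hidden_dim * 2) else (hidden_dim, hidden_dim) with hother
  set g : Int × Int → List (Int × Int) := fun il =>
    let s : Int × Int :=
      if il.1 = 0 then
        (if !skip_input then (hidden_dim, input_dim) else ((0:Int), (0:Int)))
      else
        (if bidirectional then (hidden_dim, hidden_dim * 2) else (hidden_dim, hidden_dim))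
    if bidirectional then [s, s] else [s] with hgdef
  have hbody : (fun (shapes : List (Int × Int)) (il : Int × Int) =>
      let s : Int × Int :=
        if il.1 = 0 then
          (if !skip_input then (hidden_dim, input_dim) else ((0:Int), (0:Int)))
        else
          (if bidirectional then (hidden_dim, hidden_dim * 2) else (hidden_dim, hidden_dim))
      let shapes := if bidirectional then shapes ++ [s] else shapes
      shapes ++ [s]) = fun shapes il => shapes ++ g il := by
    funext shapes il
    simp only [hgdef]
    cases bidirectional <;> simp
  rw [hbody, List.foldl_cons, icsp_foldl_append g]
  have hblk : ∀ p : Int × Int, p.1 ≠ 0 → g p = List.replicate (if bidirectional then 2 else 1) other := by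
    intro p hp
    simp only [hgdef, hother, if_neg hp]
    cases bidirectional <;> simp
  have htail := icsp_tail g _ other hblk (PySem.List.pyRange (0+1) num_layers 1) (0+1) (by omega)
  rw [htail]
  have hg0 : ([] : List (Int × Int)) ++ g ((0:Int), (0:Int)) = List.replicate (if bidirectional then 2 else 1) first := by
    simp only [hgdef, hfirst, List.nil_append]
    cases skip_input <;> cases bidirectional <;> simp
  rw [hg0]
  simp [PySem.List.length_pyRange_one, Nat.mul_comm]

-- ===== VERDICT (by name: the statement is the Claim_ definition above) =====
theorem input_connection_shape_py_spec : Claim_equal_input_connection_shape_py := by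
  intro input_dim hidden_dim num_layers bidirectional skip_input _
  unfold Spec_input_connection_shape_py
  by_cases hn : num_layers ≤ 0
  · simp only [input_connection_shape_py_alt]
    rw [icsp_loop_closed _ _ _ num_layers.toNat num_layers [] rfl, if_neg (by omega)]
    unfold input_connection_shape_py
    rw [PySem.List.pyRange_one_eq_nil (by omega)]
    simp [PySem.List.enumerate_nil]
  · simp only [input_connection_shape_py_alt]
    rw [icsp_loop_closed _ _ _ num_layers.toNat num_layers [] rfl, if_pos (by omega),
        List.nil_append, List.reverse_append, List.reverse_replicate, List.reverse_replicate,
        icsp_A_closed input_dim hidden_dim num_layers bidirectional skip_input (by omega)]
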